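-- pv_equiv track=rewrite | github.com/ShuvalovAnthony/ez_python | Danya/9/12490/17770/17770.py | check
-- ===== SOURCE A (Python) =====
-- def check(row: list):
--     row = sorted(row) # [1, 2, 3, 4, 5]
--
--     k = 0
--     for num in row:
--         if str(num)[-1] == "5":
--             k += 1
--
--
--     return (
--         (sum(row[-2:])*2 > sum(row[:3])*3) and
--         k >= 2
--     )
-- ===== SOURCE B (Python) =====
-- def _ins_asc(num, xs):
--     # insert num into ascending list xs, keeping it ascending
--     for i, x in enumerate(xs):
--         if num < x:
--             return xs[:i] + [num] + xs[i:]
--     return xs + [num]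
--
--
-- def _ins_desc(num, xs):
--     # insert num into descending list xs, keeping it descending
--     for i, x in enumerate(xs):
--         if num > x:
--             return xs[:i] + [num] + xs[i:]
--     return xs + [num]
--
--
-- def check(row: list):
--     # single pass: count of numbers ending in 5 (num % 10 == 5 over Python ints), three smallest, two largest
--     k = 0
--     bot = []  # up to three smallest, ascending
--     top = []  # up to two largest, descending
--     for num in row:
--         if num % 10 == 5:
--             k += 1
--         if len(bot) < 3 or num < bot[-1]:
--             bot = _ins_asc(num, bot)[:3]
--         if len(top) < 2 or num > top[-1]:
--             top = _ins_desc(num, top)[:2]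
--     return sum(top) * 2 > sum(bot) * 3 and k >= 2
-- ===== Notes on version B (the rewrite author's own statement) =====
-- stated objective: faster
-- what changed: Replaces sorting the whole list and slicing it with a single pass that maintains the three smallest and two largest elements in constant-size buffers (counting the numbers ending in 5 in the same pass).
import Mathlib
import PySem

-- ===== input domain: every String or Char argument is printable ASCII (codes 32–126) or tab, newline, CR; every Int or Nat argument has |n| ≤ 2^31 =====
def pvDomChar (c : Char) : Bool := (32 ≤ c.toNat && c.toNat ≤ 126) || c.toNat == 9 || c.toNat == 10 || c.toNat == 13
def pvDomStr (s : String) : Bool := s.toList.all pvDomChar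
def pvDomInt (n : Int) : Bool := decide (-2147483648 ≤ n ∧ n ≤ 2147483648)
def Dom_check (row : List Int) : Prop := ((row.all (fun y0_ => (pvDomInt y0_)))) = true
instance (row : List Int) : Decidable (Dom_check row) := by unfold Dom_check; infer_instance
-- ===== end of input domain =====

-- B replaces sorting the whole list with one pass keeping the three smallest and two largest (O(n) instead of O(n log n)).

-- str(num)[-1] == "5"  (str(num) is never empty, so pyGet? never raises here)
def endsIn5 (num : Int) : Bool := PySem.Str.pyGet? (PySem.Int.toStr num) (-1) == some '5'

-- ===== PORT A =====
def check (row : List Int) : Bool :=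
  let r := PySem.List.sorted row (fun x => x) false
  let k : Int := r.foldl (fun k num => if endsIn5 num then k + 1 else k) 0
  decide ((PySem.List.slice r (some (-2)) none).sum * 2 > (PySem.List.slice r none (some 3)).sum * 3)
    && decide (k ≥ 2)

-- ===== PORT B =====
-- num % 10 == 5 (Python % on ints)
def mod5 (num : Int) : Bool := PySem.Int.mod num 10 == 5

-- _ins_asc from Source B: insert num into an ascending list
def insAsc (num : Int) : List Int → List Int
  | [] => [num]
  | x :: xs => if num < x then num :: x :: xs else x :: insAsc num xs

-- _ins_desc from Source B: insert num into a descending list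
def insDesc (num : Int) : List Int → List Int
  | [] => [num]
  | x :: xs => if num > x then num :: x :: xs else x :: insDesc num xs

-- one loop step of Source B on the state (k, bot, top); bot[-1]/top[-1] are only read
-- when the length guard fails, so the list is nonempty and pyGetD is exact there
def stepB (s : Int × List Int × List Int) (num : Int) : Int × List Int × List Int :=
  let k := if mod5 num then s.1 + 1 else s.1
  let bot := if s.2.1.length < 3 ∨ num < PySem.List.pyGetD s.2.1 (-1) 0
             then (insAsc num s.2.1).take 3 else s.2.1
  let top := if s.2.2.length < 2 ∨ num > PySem.List.pyGetD s.2.2 (-1) 0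
             then (insDesc num s.2.2).take 2 else s.2.2
  (k, bot, top)

def check_alt (row : List Int) : Bool :=
  let s := row.foldl stepB (0, [], [])
  decide (s.2.2.sum * 2 > s.2.1.sum * 3) && decide (s.1 ≥ 2)

-- ===== PRECONDITION & SPEC =====
def Spec_check (row : List Int) (out : Bool) : Prop := out = check_alt row
instance (row : List Int) (out : Bool) : Decidable (Spec_check row out) := by unfold Spec_check; infer_instance

-- ===== CLAIM (what is proved, stated in full; the proofs are below) =====
def Claim_equal_check : Prop := ∀ (row : List Int), Dom_check row → Spec_check row (check row)

-- ===== LEMMAS AND PROOFS =====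

-- insertion produces a permutation of num :: xs
theorem insAsc_perm (num : Int) (xs : List Int) : (insAsc num xs).Perm (num :: xs) := by
  induction xs with
  | nil => simp [insAsc]
  | cons x xs ih =>
    simp only [insAsc]
    split
    · exact List.Perm.refl _
    · exact (ih.cons x).trans (List.Perm.swap _ _ _)

theorem insDesc_perm (num : Int) (xs : List Int) : (insDesc num xs).Perm (num :: xs) := by
  induction xs with
  | nil => simp [insDesc]
  | cons x xs ih =>
    simp only [insDesc]
    split
    · exact List.Perm.refl _
    · exact (ih.cons x).trans (List.Perm.swap _ _ _)

theorem insAsc_pairwise (num : Int) (xs : List Int) (h : xs.Pairwise (· ≤ ·)) :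
    (insAsc num xs).Pairwise (· ≤ ·) := by
  induction xs with
  | nil => simp [insAsc]
  | cons x xs ih =>
    rcases List.pairwise_cons.mp h with ⟨hx, ht⟩
    simp only [insAsc]
    split
    · rename_i hlt
      refine List.pairwise_cons.mpr ⟨?_, h⟩
      intro y hy
      rcases List.mem_cons.mp hy with rfl | hy
      · exact le_of_lt hlt
      · exact le_trans (le_of_lt hlt) (hx y hy)
    · rename_i hnlt
      refine List.pairwise_cons.mpr ⟨?_, ih ht⟩
      intro y hy
      rcases List.mem_cons.mp ((insAsc_perm num xs).mem_iff.mp hy) with rfl | hy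
      · exact not_lt.mp hnlt
      · exact hx y hy

theorem insDesc_pairwise (num : Int) (xs : List Int) (h : xs.Pairwise (· ≥ ·)) :
    (insDesc num xs).Pairwise (· ≥ ·) := by
  induction xs with
  | nil => simp [insDesc]
  | cons x xs ih =>
    rcases List.pairwise_cons.mp h with ⟨hx, ht⟩
    simp only [insDesc]
    split
    · rename_i hlt
      refine List.pairwise_cons.mpr ⟨?_, h⟩
      intro y hy
      rcases List.mem_cons.mp hy with rfl | hy
      · exact le_of_lt hlt
      · exact le_trans (hx y hy) (le_of_lt hlt)
    · rename_i hnlt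
      refine List.pairwise_cons.mpr ⟨?_, ih ht⟩
      intro y hy
      rcases List.mem_cons.mp ((insDesc_perm num xs).mem_iff.mp hy) with rfl | hy
      · exact not_lt.mp hnlt
      · exact hx y hy

-- trimming commutes with insertion
theorem take_insAsc (num : Int) (xs : List Int) (k : Nat) :
    (insAsc num xs).take k = (insAsc num (xs.take k)).take k := by
  induction xs generalizing k with
  | nil => simp
  | cons x xs ih =>
    cases k with
    | zero => simp
    | succ k =>
      simp only [insAsc, List.take_succ_cons]
      split
      · cases k with
        | zero => simp
        | succ m => simp [List.take_take]
      · simp [ih k]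

theorem take_insDesc (num : Int) (xs : List Int) (k : Nat) :
    (insDesc num xs).take k = (insDesc num (xs.take k)).take k := by
  induction xs generalizing k with
  | nil => simp
  | cons x xs ih =>
    cases k with
    | zero => simp
    | succ k =>
      simp only [insDesc, List.take_succ_cons]
      split
      · cases k with
        | zero => simp
        | succ m => simp [List.take_take]
      · simp [ih k]

-- when the buffer is full and num does not beat its last element, inserting and trimming is the identity
theorem take3_insAsc_full (num : Int) (l : List Int) (hp : l.Pairwise (· ≤ ·))
    (hl : l.length = 3) (hg : ¬ num < PySem.List.pyGetD l (-1) 0) :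
    (insAsc num l).take 3 = l := by
  match l, hl with
  | [a, b, c], _ =>
    have hab : a ≤ b := by simp [List.pairwise_cons] at hp; omega
    have hbc : b ≤ c := by simp [List.pairwise_cons] at hp; omega
    have hc : ¬ num < c := by simpa [PySem.List.pyGetD, PySem.List.pyGet?, PySem.List.pyIdx?] using hg
    simp only [insAsc, if_neg (by omega : ¬ num < a), if_neg (by omega : ¬ num < b),
      if_neg (by omega : ¬ num < c)]
    rfl

theorem take2_insDesc_full (num : Int) (l : List Int) (hp : l.Pairwise (· ≥ ·))
    (hl : l.length = 2) (hg : ¬ num > PySem.List.pyGetD l (-1) 0) :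
    (insDesc num l).take 2 = l := by
  match l, hl with
  | [a, b], _ =>
    have hab : b ≤ a := by simp [List.pairwise_cons] at hp; omega
    have hb : ¬ num > b := by simpa [PySem.List.pyGetD, PySem.List.pyGet?, PySem.List.pyIdx?] using hg
    simp only [insDesc, if_neg (by omega : ¬ num > a), if_neg (by omega : ¬ num > b)]
    rfl

-- the full insertion sorts maintained in the proofs
def ascFold (S : List Int) (xs : List Int) : List Int := xs.foldl (fun acc x => insAsc x acc) S
def descFold (T : List Int) (xs : List Int) : List Int := xs.foldl (fun acc x => insDesc x acc) T

theorem ascFold_perm (xs : List Int) : ∀ S : List Int, (ascFold S xs).Perm (xs ++ S) := by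
  induction xs with
  | nil => intro S; simp [ascFold]
  | cons x xs ih =>
    intro S
    have h1 : (ascFold (insAsc x S) xs).Perm (xs ++ insAsc x S) := ih (insAsc x S)
    have h2 : (xs ++ insAsc x S).Perm (xs ++ x :: S) := (insAsc_perm x S).append_left xs
    exact (h1.trans h2).trans (List.perm_middle)

theorem descFold_perm (xs : List Int) : ∀ T : List Int, (descFold T xs).Perm (xs ++ T) := by
  induction xs with
  | nil => intro T; simp [descFold]
  | cons x xs ih =>
    intro T
    have h1 : (descFold (insDesc x T) xs).Perm (xs ++ insDesc x T) := ih (insDesc x T)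
    have h2 : (xs ++ insDesc x T).Perm (xs ++ x :: T) := (insDesc_perm x T).append_left xs
    exact (h1.trans h2).trans (List.perm_middle)

theorem ascFold_pairwise (xs : List Int) : ∀ S : List Int, S.Pairwise (· ≤ ·) →
    (ascFold S xs).Pairwise (· ≤ ·) := by
  induction xs with
  | nil => intro S h; simpa [ascFold] using h
  | cons x xs ih => intro S h; exact ih _ (insAsc_pairwise x S h)

theorem descFold_pairwise (xs : List Int) : ∀ T : List Int, T.Pairwise (· ≥ ·) →
    (descFold T xs).Pairwise (· ≥ ·) := by
  induction xs with
  | nil => intro T h; simpa [descFold] using h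
  | cons x xs ih => intro T h; exact ih _ (insDesc_pairwise x T h)

-- one B-step, described against the full (untrimmed) sorted buffers
theorem stepB_eq (k : Int) (S T : List Int) (num : Int)
    (hS : S.Pairwise (· ≤ ·)) (hT : T.Pairwise (· ≥ ·)) :
    stepB (k, S.take 3, T.take 2) num =
      ((if mod5 num then k + 1 else k), (insAsc num S).take 3, (insDesc num T).take 2) := by
  unfold stepB
  refine Prod.ext rfl (Prod.ext ?_ ?_)
  · show (if (S.take 3).length < 3 ∨ num < PySem.List.pyGetD (S.take 3) (-1) 0
          then (insAsc num (S.take 3)).take 3 else S.take 3) = (insAsc num S).take 3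
    rw [take_insAsc num S 3]
    split
    · rfl
    · rename_i hng
      rw [not_or] at hng
      exact (take3_insAsc_full num (S.take 3)
        (hS.sublist (List.take_sublist _ _)) (by have h := List.length_take_le 3 S; omega) (hng.2)).symm
  · show (if (T.take 2).length < 2 ∨ num > PySem.List.pyGetD (T.take 2) (-1) 0
          then (insDesc num (T.take 2)).take 2 else T.take 2) = (insDesc num T).take 2
    rw [take_insDesc num T 2]
    split
    · rfl
    · rename_i hng
      rw [not_or] at hng
      exact (take2_insDesc_full num (T.take 2)
        (hT.sublist (List.take_sublist _ _)) (by have h := List.length_take_le 2 T; omega) (hng.2)).symm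

-- the loop invariant of B's single pass
theorem foldB_inv (xs : List Int) : ∀ (k : Int) (S T : List Int),
    S.Pairwise (· ≤ ·) → T.Pairwise (· ≥ ·) →
    xs.foldl stepB (k, S.take 3, T.take 2) =
      (k + (xs.countP mod5 : Int), (ascFold S xs).take 3, (descFold T xs).take 2) := by
  induction xs with
  | nil => intro k S T _ _; simp [ascFold, descFold]
  | cons x xs ih =>
    intro k S T hS hT
    rw [List.foldl_cons, stepB_eq k S T x hS hT,
        ih _ (insAsc x S) (insDesc x T) (insAsc_pairwise x S hS) (insDesc_pairwise x T hT)]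
    simp only [ascFold, descFold, List.foldl_cons, List.countP_cons]
    congr 1
    by_cases h : mod5 x
    · simp [h]; ring
    · simp [h]

-- B's buffers are the head and (reversed) tail of Python's sorted list
theorem sorted_eq_ascFold (row : List Int) :
    PySem.List.sorted row (fun x => x) false = ascFold [] row :=
  PySem.List.sorted_id_eq_of_perm_of_pairwise row (ascFold [] row)
    (by simpa using ascFold_perm row []) (ascFold_pairwise row [] (by simp))

theorem sorted_reverse_eq_descFold (row : List Int) :
    (PySem.List.sorted row (fun x => x) false).reverse = descFold [] row := by
  have h : PySem.List.sorted row (fun x => x) false = (descFold [] row).reverse :=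
    PySem.List.sorted_id_eq_of_perm_of_pairwise row ((descFold [] row).reverse)
      (by simpa using (List.reverse_perm _).trans (descFold_perm row []))
      (List.pairwise_reverse.mpr (descFold_pairwise row [] (by simp)))
  simp [h]

-- str(num)[-1] == "5" is exactly num % 10 == 5 (Python semantics on both sides)
theorem toDigitsCore_getLast?_acc (b : Nat) : ∀ (f n : Nat) (ds : List Char), ds ≠ [] →
    (Nat.toDigitsCore b f n ds).getLast? = ds.getLast? := by
  intro f
  induction f with
  | zero => intro n ds _; rfl
  | succ f ih =>
    intro n ds h
    simp only [Nat.toDigitsCore]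
    split
    · match ds, h with
      | d :: ds, _ => simp [List.getLast?_cons_cons]
    · rw [ih _ _ (by simp)]
      match ds, h with
      | d :: ds, _ => simp [List.getLast?_cons_cons]

theorem toDigits_getLast? (m : Nat) :
    (Nat.toDigits 10 m).getLast? = some (Nat.digitChar (m % 10)) := by
  show (Nat.toDigitsCore 10 (m + 1) m []).getLast? = some (Nat.digitChar (m % 10))
  cases hm : m + 1 with
  | zero => omega
  | succ f =>
    simp only [Nat.toDigitsCore]
    split
    · simp
    · rw [toDigitsCore_getLast?_acc 10 f _ _ (by simp)]
      simp

theorem digitChar_eq_five_iff (m : Nat) (h : m < 10) : Nat.digitChar m = '5' ↔ m = 5 := by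
  interval_cases m <;> simp [Nat.digitChar]

theorem toChars_getLast? (n : Int) :
    (PySem.Int.toChars n).getLast? = some (Nat.digitChar (n.natAbs % 10)) := by
  unfold PySem.Int.toChars
  split
  · rename_i hneg
    have hD := toDigits_getLast? n.natAbs
    match hDs : Nat.toDigits 10 n.natAbs, hD with
    | d :: ds, hD => rw [List.getLast?_cons_cons]; exact hDs ▸ hD
  · rename_i hpos
    have : n.toNat = n.natAbs := by omega
    rw [this]; exact toDigits_getLast? n.natAbs

theorem endsIn5_eq_mod5 (n : Int) : endsIn5 n = mod5 n := by
  have hlast : PySem.Str.pyGet? (PySem.Int.toStr n) (-1)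
      = some (Nat.digitChar (n.natAbs % 10)) := by
    show PySem.Chars.pyGet? (PySem.Int.toStr n).toList (-1) = _
    have ht : (PySem.Int.toStr n).toList = PySem.Int.toChars n := by
      simp [PySem.Int.toStr]
    rw [ht]
    show PySem.List.pyGet? (PySem.Int.toChars n) (-1) = _
    rw [PySem.List.pyGet?_neg_one (PySem.Int.toChars n), toChars_getLast? n]
  have hmod : PySem.Int.mod n 10 = n % 10 := PySem.Int.mod_eq_emod_of_pos (by omega)
  have hlt : n.natAbs % 10 < 10 := Nat.mod_lt _ (by omega)
  unfold endsIn5 mod5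
  rw [hlast, hmod]
  by_cases h : n.natAbs % 10 = 5
  · have h2 : n % 10 = 5 := by omega
    rw [h, h2]; rfl
  · have h2 : n % 10 ≠ 5 := by omega
    have h3 : Nat.digitChar (n.natAbs % 10) ≠ '5' :=
      fun hc => h ((digitChar_eq_five_iff _ hlt).mp hc)
    simp [h2, h3]

-- sum of the last two elements = sum of the first two of the reverse
theorem sum_drop_eq_sum_take_reverse (r : List Int) :
    (r.drop (r.length - 2)).sum = (r.reverse.take 2).sum := by
  rw [List.take_reverse]
  simp

-- ===== VERDICT (by name: the statement is the Claim_ definition above) =====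
theorem check_spec : Claim_equal_check := by
  intro row _
  show check row = check_alt row
  unfold check check_alt
  have hfold : row.foldl stepB (0, [], []) =
      (0 + (row.countP mod5 : Int), (ascFold [] row).take 3, (descFold [] row).take 2) :=
    foldB_inv row 0 [] [] (by simp) (by simp)
  rw [hfold]
  set r := PySem.List.sorted row (fun x => x) false with hr
  have hslice2 : PySem.List.slice r (some (-2)) none = r.drop (r.length - 2) :=
    PySem.List.slice_from_neg_ofNat r 2 (by omega)
  have hslice3 : PySem.List.slice r none (some 3) = r.take 3 :=
    PySem.List.slice_to r (by omega)
  have hpred : endsIn5 = mod5 := funext endsIn5_eq_mod5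
  have hk : r.foldl (fun k num => if endsIn5 num then k + 1 else k) 0
      = ((row.countP mod5 : Nat) : Int) := by
    rw [PySem.List.foldl_count_if endsIn5 r 0,
        (PySem.List.sorted_perm row (fun x => x) false).countP_eq endsIn5, hpred]
    simp
  simp only [hslice2, hslice3, hk, ← sorted_eq_ascFold row, ← sorted_reverse_eq_descFold row, ← hr]
  rw [sum_drop_eq_sum_take_reverse r]
  simp
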